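-- pv_equiv track=rewrite | github.com/DATA-UFMS/multidimensional-oesnpg | src/models/dimensions/dim_ods.py | _mapear_macrocategoria
-- ===== SOURCE A (Python) =====
-- MACROCATEGORIAS = {
--     "Social": {
--         "numeros": {1, 2, 3, 4, 5, 10, 18, 19},
--         "ods_associados": (
--             "ODS 1 - Erradicação da Pobreza; "
--             "ODS 2 - Fome Zero e Agricultura Sustentável; "
--             "ODS 3 - Saúde e Bem-Estar; "
--             "ODS 4 - Educação de Qualidade; "
--             "ODS 5 - Igualdade de Gênero; "
--             "ODS 10 - Redução das Desigualdades; "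
--             "ODS 18 - Cultura da Paz e Direitos Humanos; "
--             "ODS 19 - Educação Superior de Qualidade, Inclusiva e Sustentável"
--         ),
--         "foco_principal": "Foco em bem-estar humano, inclusão social, igualdade de gênero e raça, formação educacional e valorização da diversidade cultural.",
--     },
--     "Econômica": {
--         "numeros": {7, 8, 9, 11, 20},
--         "ods_associados": (
--             "ODS 7 - Energia Acessível e Limpa; "
--             "ODS 8 - Trabalho Decente e Crescimento Econômico; "
--             "ODS 9 - Indústria, Inovação e Infraestrutura; "
--             "ODS 11 - Cidades e Comunidades Sustentáveis; "
--             "ODS 20 - Ciência, Tecnologia e Inovação para o Desenvolvimento Sustentável"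
--         ),
--         "foco_principal": "Foco em crescimento sustentável, inovação, geração de emprego, infraestrutura inteligente e transformação tecnológica.",
--     },
--     "Ambiental": {
--         "numeros": {6, 12, 13, 14, 15},
--         "ods_associados": (
--             "ODS 6 - Água Potável e Saneamento; "
--             "ODS 12 - Consumo e Produção Responsáveis; "
--             "ODS 13 - Ação Contra a Mudança Global do Clima; "
--             "ODS 14 - Vida na Água; "
--             "ODS 15 - Vida Terrestre"
--         ),
--         "foco_principal": "Foco em conservação ambiental, uso sustentável dos recursos naturais, saneamento básico e biodiversidade.",
--     },
--     "Institucional / Governança": {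
--         "numeros": {16, 17},
--         "transversal": {18, 20},
--         "ods_associados": (
--             "ODS 16 - Paz, Justiça e Instituições Eficazes; "
--             "ODS 17 - Parcerias e Meios de Implementação; "
--             "ODS 18 - Cultura da Paz e Direitos Humanos (Transversal); "
--             "ODS 20 - Ciência, Tecnologia e Inovação para o Desenvolvimento Sustentável (Transversal)"
--         ),
--         "foco_principal": "Foco em governança democrática, cooperação interinstitucional, fortalecimento de políticas públicas e implementação dos ODS.",
--     },
-- }
--
-- def _mapear_macrocategoria(numero: int):
--     for nome, info in MACROCATEGORIAS.items():
--         if numero in info.get("numeros", set()):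
--             return (
--                 nome,
--                 info["ods_associados"],
--                 info["foco_principal"],
--             )
--
--     for nome, info in MACROCATEGORIAS.items():
--         if numero in info.get("transversal", set()):
--             return (
--                 f"{nome} (Transversal)",
--                 info["ods_associados"],
--                 info["foco_principal"],
--             )
--
--     return (
--         'Expansão Complementar',
--         f'ODS {numero}',
--         'Eixos complementares definidos nas expansões dos ODS.',
--     )
-- ===== SOURCE B (Python) =====
-- # B: one flat lookup table (numero -> full result tuple) built once; the
-- # function is a single dict lookup with an input-dependent fallback.
--
-- MACROCATEGORIAS = {
--     "Social": {
--         "numeros": {1, 2, 3, 4, 5, 10, 18, 19},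
--         "ods_associados": (
--             "ODS 1 - Erradicação da Pobreza; "
--             "ODS 2 - Fome Zero e Agricultura Sustentável; "
--             "ODS 3 - Saúde e Bem-Estar; "
--             "ODS 4 - Educação de Qualidade; "
--             "ODS 5 - Igualdade de Gênero; "
--             "ODS 10 - Redução das Desigualdades; "
--             "ODS 18 - Cultura da Paz e Direitos Humanos; "
--             "ODS 19 - Educação Superior de Qualidade, Inclusiva e Sustentável"
--         ),
--         "foco_principal": "Foco em bem-estar humano, inclusão social, igualdade de gênero e raça, formação educacional e valorização da diversidade cultural.",
--     },
--     "Econômica": {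
--         "numeros": {7, 8, 9, 11, 20},
--         "ods_associados": (
--             "ODS 7 - Energia Acessível e Limpa; "
--             "ODS 8 - Trabalho Decente e Crescimento Econômico; "
--             "ODS 9 - Indústria, Inovação e Infraestrutura; "
--             "ODS 11 - Cidades e Comunidades Sustentáveis; "
--             "ODS 20 - Ciência, Tecnologia e Inovação para o Desenvolvimento Sustentável"
--         ),
--         "foco_principal": "Foco em crescimento sustentável, inovação, geração de emprego, infraestrutura inteligente e transformação tecnológica.",
--     },
--     "Ambiental": {
--         "numeros": {6, 12, 13, 14, 15},
--         "ods_associados": (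
--             "ODS 6 - Água Potável e Saneamento; "
--             "ODS 12 - Consumo e Produção Responsáveis; "
--             "ODS 13 - Ação Contra a Mudança Global do Clima; "
--             "ODS 14 - Vida na Água; "
--             "ODS 15 - Vida Terrestre"
--         ),
--         "foco_principal": "Foco em conservação ambiental, uso sustentável dos recursos naturais, saneamento básico e biodiversidade.",
--     },
--     "Institucional / Governança": {
--         "numeros": {16, 17},
--         "transversal": {18, 20},
--         "ods_associados": (
--             "ODS 16 - Paz, Justiça e Instituições Eficazes; "
--             "ODS 17 - Parcerias e Meios de Implementação; "
--             "ODS 18 - Cultura da Paz e Direitos Humanos (Transversal); "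
--             "ODS 20 - Ciência, Tecnologia e Inovação para o Desenvolvimento Sustentável (Transversal)"
--         ),
--         "foco_principal": "Foco em governança democrática, cooperação interinstitucional, fortalecimento de políticas públicas e implementação dos ODS.",
--     },
-- }
--
-- _TABELA = {}
-- for _nome, _info in MACROCATEGORIAS.items():
--     for _n in sorted(_info.get("numeros", set())):
--         _TABELA[_n] = (_nome, _info["ods_associados"], _info["foco_principal"])
-- for _nome, _info in MACROCATEGORIAS.items():
--     for _n in sorted(_info.get("transversal", set())):
--         if _n not in _TABELA:
--             _TABELA[_n] = (
--                 f"{_nome} (Transversal)",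
--                 _info["ods_associados"],
--                 _info["foco_principal"],
--             )
--
-- def _mapear_macrocategoria(numero: int):
--     hit = _TABELA.get(numero)
--     if hit is not None:
--         return hit
--     return (
--         'Expansão Complementar',
--         f'ODS {numero}',
--         'Eixos complementares definidos nas expansões dos ODS.',
--     )
-- ===== Notes on version B (the rewrite author's own statement) =====
-- stated objective: simpler
-- what changed: Replaces A's two sequential scans over the category table (numeros, then transversal) by a flat numero->result dict built once at import (numeros entries first, transversal only for absent keys), so the function body is a single dict lookup plus the input-dependent fallback.
import Mathlib
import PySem

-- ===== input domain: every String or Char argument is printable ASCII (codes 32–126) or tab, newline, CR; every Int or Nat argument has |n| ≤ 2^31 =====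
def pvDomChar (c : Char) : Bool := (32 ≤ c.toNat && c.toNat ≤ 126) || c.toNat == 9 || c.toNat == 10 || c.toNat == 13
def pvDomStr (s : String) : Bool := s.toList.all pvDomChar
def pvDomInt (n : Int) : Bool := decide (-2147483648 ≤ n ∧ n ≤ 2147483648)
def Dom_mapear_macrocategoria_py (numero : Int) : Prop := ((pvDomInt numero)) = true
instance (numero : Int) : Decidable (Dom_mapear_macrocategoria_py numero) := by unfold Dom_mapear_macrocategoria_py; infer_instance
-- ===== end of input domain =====

-- B replaces A's two sequential scans over the category table by one flat
-- numero → result dict built once, so the function body is a single lookup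
-- (objective: simpler).

-- shared module-level data: MACROCATEGORIAS as (nome, numeros, transversal, ods_associados, foco_principal)
def pvMacro : List (String × List Int × List Int × String × String) :=
  [ ("Social", [1, 2, 3, 4, 5, 10, 18, 19], [],
      "ODS 1 - Erradicação da Pobreza; ODS 2 - Fome Zero e Agricultura Sustentável; ODS 3 - Saúde e Bem-Estar; ODS 4 - Educação de Qualidade; ODS 5 - Igualdade de Gênero; ODS 10 - Redução das Desigualdades; ODS 18 - Cultura da Paz e Direitos Humanos; ODS 19 - Educação Superior de Qualidade, Inclusiva e Sustentável",
      "Foco em bem-estar humano, inclusão social, igualdade de gênero e raça, formação educacional e valorização da diversidade cultural."),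
    ("Econômica", [7, 8, 9, 11, 20], [],
      "ODS 7 - Energia Acessível e Limpa; ODS 8 - Trabalho Decente e Crescimento Econômico; ODS 9 - Indústria, Inovação e Infraestrutura; ODS 11 - Cidades e Comunidades Sustentáveis; ODS 20 - Ciência, Tecnologia e Inovação para o Desenvolvimento Sustentável",
      "Foco em crescimento sustentável, inovação, geração de emprego, infraestrutura inteligente e transformação tecnológica."),
    ("Ambiental", [6, 12, 13, 14, 15], [],
      "ODS 6 - Água Potável e Saneamento; ODS 12 - Consumo e Produção Responsáveis; ODS 13 - Ação Contra a Mudança Global do Clima; ODS 14 - Vida na Água; ODS 15 - Vida Terrestre",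
      "Foco em conservação ambiental, uso sustentável dos recursos naturais, saneamento básico e biodiversidade."),
    ("Institucional / Governança", [16, 17], [18, 20],
      "ODS 16 - Paz, Justiça e Instituições Eficazes; ODS 17 - Parcerias e Meios de Implementação; ODS 18 - Cultura da Paz e Direitos Humanos (Transversal); ODS 20 - Ciência, Tecnologia e Inovação para o Desenvolvimento Sustentável (Transversal)",
      "Foco em governança democrática, cooperação interinstitucional, fortalecimento de políticas públicas e implementação dos ODS.") ]

-- ===== PORT A =====
-- two 'for … if … return' scans, then the fallback
def mapear_macrocategoria_py (numero : Int) : String × String × String :=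
  match pvMacro.find? (fun c => c.2.1.contains numero) with
  | some (nome, _, _, ods, foco) => (nome, ods, foco)
  | none =>
    match pvMacro.find? (fun c => c.2.2.1.contains numero) with
    | some (nome, _, _, ods, foco) => (nome ++ " (Transversal)", ods, foco)
    | none =>
      ("Expansão Complementar", "ODS " ++ PySem.Int.toStr numero,
       "Eixos complementares definidos nas expansões dos ODS.")

-- ===== PORT B =====
-- flat table built once: numeros first, transversal only for absent keys
def pvTabela : PySem.Dict Int (String × String × String) :=
  let t := pvMacro.foldl
    (fun t c => c.2.1.foldl (fun t n => t.insert n (c.1, c.2.2.2.1, c.2.2.2.2)) t)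
    PySem.Dict.empty
  pvMacro.foldl
    (fun t c => c.2.2.1.foldl
      (fun t n => if t.contains n then t
                  else t.insert n (c.1 ++ " (Transversal)", c.2.2.2.1, c.2.2.2.2)) t)
    t

def mapear_macrocategoria_py_alt (numero : Int) : String × String × String :=
  match pvTabela.get? numero with
  | some hit => hit
  | none =>
      ("Expansão Complementar", "ODS " ++ PySem.Int.toStr numero,
       "Eixos complementares definidos nas expansões dos ODS.")

-- ===== PRECONDITION & SPEC =====
def Spec_mapear_macrocategoria_py (numero : Int) (out : String × String × String) : Prop := out = mapear_macrocategoria_py_alt numero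
instance (numero : Int) (out : String × String × String) : Decidable (Spec_mapear_macrocategoria_py numero out) := by unfold Spec_mapear_macrocategoria_py; infer_instance

-- ===== CLAIM (what is proved, stated in full; the proofs are below) =====
def Claim_equal_mapear_macrocategoria_py : Prop := ∀ (numero : Int), Dom_mapear_macrocategoria_py numero → Spec_mapear_macrocategoria_py numero (mapear_macrocategoria_py numero)

-- ===== LEMMAS AND PROOFS =====

-- outside 1..20 both programs fall through to the same fallback
theorem pv_out_of_table (numero : Int) (h : numero < 1 ∨ 20 < numero) :
    mapear_macrocategoria_py numero = mapear_macrocategoria_py_alt numero := by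
  have ha : pvMacro.find? (fun c => c.2.1.contains numero) = none := by
    rw [List.find?_eq_none]
    intro c hc
    simp only [pvMacro, List.mem_cons, List.not_mem_nil, or_false] at hc
    rcases hc with h'|h'|h'|h' <;> subst h' <;> simp <;> omega
  have hb : pvMacro.find? (fun c => c.2.2.1.contains numero) = none := by
    rw [List.find?_eq_none]
    intro c hc
    simp only [pvMacro, List.mem_cons, List.not_mem_nil, or_false] at hc
    rcases hc with h'|h'|h'|h' <;> subst h' <;> simp <;> omega
  have hkeys : pvTabela.items.map (·.1) =
      [1, 2, 3, 4, 5, 10, 18, 19, 7, 8, 9, 11, 20, 6, 12, 13, 14, 15, 16, 17] := by decide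
  have hd : pvTabela.get? numero = none := by
    simp only [PySem.Dict.get?, Option.map_eq_none_iff]
    rw [List.find?_eq_none]
    intro p hp
    have hm : p.1 ∈ pvTabela.items.map (·.1) := List.mem_map_of_mem hp
    rw [hkeys] at hm
    simp only [List.mem_cons, List.not_mem_nil, or_false] at hm
    simp only [beq_eq_false_iff_ne, ne_eq, Bool.not_eq_true]
    omega
  unfold mapear_macrocategoria_py mapear_macrocategoria_py_alt
  rw [ha, hb, hd]

-- ===== VERDICT (by name: the statement is the Claim_ definition above) =====
theorem mapear_macrocategoria_py_spec : Claim_equal_mapear_macrocategoria_py := by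
  intro numero _
  unfold Spec_mapear_macrocategoria_py
  by_cases h : 1 ≤ numero ∧ numero ≤ 20
  · obtain ⟨h1, h2⟩ := h
    interval_cases numero <;> rfl
  · exact pv_out_of_table numero (by omega)
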